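-- pv_equiv track=rewrite | github.com/s710082105/fine_d | backend/adapters/fine/connection_summary_parser.py | _sanitize_sqlserver_url
-- ===== SOURCE A (Python) =====
-- REDACTED = "***"
--
-- SQLSERVER_PREFIX = "sqlserver://"
--
-- SENSITIVE_QUERY_KEYS = {
--     "password",
--     "passwd",
--     "pwd",
--     "secret",
--     "access_token",
--     "token",
--     "user",
--     "username",
-- }
--
-- def _sanitize_sqlserver_url(value: str) -> str:
--     suffix = value[len(SQLSERVER_PREFIX) :]
--     host_part, separator, properties = suffix.partition(";")
--     safe_host = _strip_userinfo(host_part)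
--     if not separator:
--         return f"{SQLSERVER_PREFIX}{safe_host}"
--     safe_properties = ";".join(
--         _sanitize_sqlserver_property(item)
--         for item in _split_sqlserver_properties(properties)
--     )
--     return f"{SQLSERVER_PREFIX}{safe_host};{safe_properties}"
--
-- def _sanitize_sqlserver_property(item: str) -> str:
--     key, separator, property_value = item.partition("=")
--     if not separator:
--         return item
--     if key.strip().lower() not in SENSITIVE_QUERY_KEYS:
--         return item
--     return f"{key}{separator}{REDACTED}"
--
-- def _split_sqlserver_properties(value: str) -> list[str]:
--     items: list[str] = []
--     current: list[str] = []
--     brace_depth = 0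
--     for char in value:
--         if char == ";" and brace_depth == 0:
--             items.append("".join(current))
--             current = []
--             continue
--         current.append(char)
--         if char == "{":
--             brace_depth += 1
--             continue
--         if char == "}" and brace_depth > 0:
--             brace_depth -= 1
--     items.append("".join(current))
--     return items
--
-- def _strip_userinfo(netloc: str) -> str:
--     if "@" not in netloc:
--         return netloc
--     return netloc.rsplit("@", 1)[1]
-- ===== SOURCE B (Python) =====
-- REDACTED = "***"
--
-- SQLSERVER_PREFIX = "sqlserver://"
--
-- SENSITIVE_QUERY_KEYS = {
--     "password",
--     "passwd",
--     "pwd",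
--     "secret",
--     "access_token",
--     "token",
--     "user",
--     "username",
-- }
--
--
-- def _sanitize_sqlserver_url(value: str) -> str:
--     suffix = value[len(SQLSERVER_PREFIX):]
--     if ";" not in suffix:
--         return SQLSERVER_PREFIX + suffix.rsplit("@", 1)[-1]
--     host, props = suffix.split(";", 1)
--     out = [SQLSERVER_PREFIX, host.rsplit("@", 1)[-1], ";"]
--     key, val, depth = [], None, 0
--
--     def flush():
--         if val is None:
--             return "".join(key)
--         k = "".join(key)
--         v = REDACTED if k.strip().lower() in SENSITIVE_QUERY_KEYS else "".join(val)
--         return k + "=" + v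
--
--     for ch in props:
--         if ch == ";" and depth == 0:
--             out.append(flush())
--             out.append(";")
--             key, val = [], None
--         else:
--             if val is None and ch == "=":
--                 val = []
--             elif val is None:
--                 key.append(ch)
--             else:
--                 val.append(ch)
--             if ch == "{":
--                 depth += 1
--             elif ch == "}" and depth:
--                 depth -= 1
--     out.append(flush())
--     return "".join(out)
-- ===== Notes on version B (the rewrite author's own statement) =====
-- stated objective: alternative
-- what changed: B replaces A's three-helper decomposition (split the properties into a list, map a sanitizer over it, join) by one fused left-to-right pass over the properties that tracks brace depth and the key/value split in its state and emits each sanitized segment as soon as its top-level separator is reached; the host is taken by a single rsplit with the whole string as fallback.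
import Mathlib
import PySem

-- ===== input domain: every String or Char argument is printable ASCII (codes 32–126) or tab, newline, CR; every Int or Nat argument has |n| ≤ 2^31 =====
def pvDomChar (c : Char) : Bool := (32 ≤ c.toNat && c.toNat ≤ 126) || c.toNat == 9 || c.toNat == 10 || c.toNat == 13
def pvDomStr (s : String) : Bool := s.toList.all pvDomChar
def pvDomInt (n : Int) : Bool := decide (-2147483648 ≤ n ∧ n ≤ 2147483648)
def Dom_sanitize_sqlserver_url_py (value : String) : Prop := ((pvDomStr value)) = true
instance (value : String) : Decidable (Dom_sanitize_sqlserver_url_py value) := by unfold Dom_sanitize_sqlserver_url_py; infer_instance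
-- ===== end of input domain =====

-- B replaces A's split-into-list-then-map decomposition by a single fused left-to-right
-- pass that emits each sanitized property segment as soon as its top-level ';' is reached
-- (objective: alternative decomposition, same cost).

-- Module constants shared by both Pythons (same module)
def pvPrefix : List Char := "sqlserver://".toList
def pvKeys : List (List Char) :=
  ["password".toList, "passwd".toList, "pwd".toList, "secret".toList,
   "access_token".toList, "token".toList, "user".toList, "username".toList]
-- rsplit(sep, 1)[-1] = everything after the last occurrence of sep (whole string if absent);
-- ported as the corresponding closed form on List Char (exact)
def pvAfterLast (sep : Char) (cs : List Char) : List Char :=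
  (cs.reverse.takeWhile (· ≠ sep)).reverse

-- ===== PORT A =====
-- str.partition(sep) for a one-char separator, hand port (exact): scan for the first sep
def pvPartitionChar (sep : Char) : List Char → List Char × Bool × List Char
  | [] => ([], false, [])
  | c :: cs =>
    if c = sep then ([], true, cs)
    else
      let r := pvPartitionChar sep cs
      (c :: r.1, r.2.1, r.2.2)

def pvStripUserinfo (netloc : List Char) : List Char :=
  if netloc.contains '@' = false then netloc else pvAfterLast '@' netloc

def pvSanProp (item : List Char) : List Char :=
  let p := pvPartitionChar '=' item
  if p.2.1 = false then item
  else if PySem.Chars.lower (PySem.Chars.strip p.1) ∈ pvKeys then p.1 ++ '=' :: "***".toList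
  else item

def pvSplitStep (st : List (List Char) × List Char × Nat) (c : Char) :
    List (List Char) × List Char × Nat :=
  if c = ';' ∧ st.2.2 = 0 then (st.1 ++ [st.2.1], [], st.2.2)
  else
    let cur' := st.2.1 ++ [c]
    if c = '{' then (st.1, cur', st.2.2 + 1)
    else if c = '}' ∧ st.2.2 > 0 then (st.1, cur', st.2.2 - 1)
    else (st.1, cur', st.2.2)

def pvSplitProps (cs : List Char) : List (List Char) :=
  let r := cs.foldl pvSplitStep ([], [], 0)
  r.1 ++ [r.2.1]

def sanitize_sqlserver_url_py (value : String) : String :=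
  let suffix := value.toList.drop pvPrefix.length
  let p := pvPartitionChar ';' suffix
  let safeHost := pvStripUserinfo p.1
  if p.2.1 = false then String.ofList (pvPrefix ++ safeHost)
  else
    String.ofList (pvPrefix ++ safeHost ++ [';'] ++
      PySem.Chars.join [';'] ((pvSplitProps p.2.2).map pvSanProp))

-- ===== PORT B =====
def pvFlushB (key : List Char) (val? : Option (List Char)) : List Char :=
  match val? with
  | none => key
  | some v =>
    if PySem.Chars.lower (PySem.Chars.strip key) ∈ pvKeys then key ++ '=' :: "***".toList
    else key ++ '=' :: v

def pvStepB (st : List Char × List Char × Option (List Char) × Nat) (c : Char) :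
    List Char × List Char × Option (List Char) × Nat :=
  if c = ';' ∧ st.2.2.2 = 0 then (st.1 ++ pvFlushB st.2.1 st.2.2.1 ++ [';'], [], none, st.2.2.2)
  else
    let kv : List Char × Option (List Char) :=
      match st.2.2.1 with
      | none => if c = '=' then (st.2.1, some []) else (st.2.1 ++ [c], none)
      | some v => (st.2.1, some (v ++ [c]))
    if c = '{' then (st.1, kv.1, kv.2, st.2.2.2 + 1)
    else if c = '}' ∧ st.2.2.2 ≠ 0 then (st.1, kv.1, kv.2, st.2.2.2 - 1)
    else (st.1, kv.1, kv.2, st.2.2.2)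

def sanitize_sqlserver_url_py_alt (value : String) : String :=
  let suffix := value.toList.drop pvPrefix.length
  if suffix.contains ';' = false then String.ofList (pvPrefix ++ pvAfterLast '@' suffix)
  else
    let host := suffix.takeWhile (· ≠ ';')
    let props := (suffix.dropWhile (· ≠ ';')).tail
    let r := props.foldl pvStepB (pvPrefix ++ pvAfterLast '@' host ++ [';'], [], none, 0)
    String.ofList (r.1 ++ pvFlushB r.2.1 r.2.2.1)

-- ===== PRECONDITION & SPEC =====
def Spec_sanitize_sqlserver_url_py (value : String) (out : String) : Prop := out = sanitize_sqlserver_url_py_alt value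
instance (value : String) (out : String) : Decidable (Spec_sanitize_sqlserver_url_py value out) := by unfold Spec_sanitize_sqlserver_url_py; infer_instance

-- ===== CLAIM (what is proved, stated in full; the proofs are below) =====
def Claim_equal_sanitize_sqlserver_url_py : Prop := ∀ (value : String), Dom_sanitize_sqlserver_url_py value → Spec_sanitize_sqlserver_url_py value (sanitize_sqlserver_url_py value)

-- ===== LEMMAS AND PROOFS =====

-- the segment A's state machine is currently building, reconstructed from B's (key, val?) state
def pvRep (key : List Char) (val? : Option (List Char)) : List Char :=
  match val? with
  | none => key
  | some v => key ++ '=' :: v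

-- A's property splitter, recast as plain recursion (proof device)
def pvSplitRec : List Char → List Char → Nat → List (List Char)
  | [], cur, _ => [cur]
  | c :: cs, cur, d =>
    if c = ';' ∧ d = 0 then cur :: pvSplitRec cs [] d
    else
      pvSplitRec cs (cur ++ [c])
        (if c = '{' then d + 1 else if c = '}' ∧ d > 0 then d - 1 else d)

theorem pvSplitRec_ne_nil (cs : List Char) : ∀ (cur : List Char) (d : Nat), pvSplitRec cs cur d ≠ [] := by
  induction cs with
  | nil => intro cur d; simp [pvSplitRec]
  | cons c cs ih => intro cur d; unfold pvSplitRec; split_ifs <;> simp [ih]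

theorem pvJoin_cons (s x : List Char) (L : List (List Char)) (h : L ≠ []) :
    PySem.Chars.join s (x :: L) = x ++ s ++ PySem.Chars.join s L := by
  cases L with
  | nil => exact absurd rfl h
  | cons y t => simp [PySem.Chars.join_cons_cons]

theorem pvFoldl_split (cs : List Char) : ∀ (items : List (List Char)) (cur : List Char) (d : Nat),
    (cs.foldl pvSplitStep (items, cur, d)).1 ++ [(cs.foldl pvSplitStep (items, cur, d)).2.1]
      = items ++ pvSplitRec cs cur d := by
  induction cs with
  | nil => intro items cur d; simp [pvSplitRec]
  | cons c cs ih =>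
    intro items cur d
    by_cases h : c = ';' ∧ d = 0
    · simp only [List.foldl_cons, pvSplitStep, pvSplitRec, if_pos h, ih]
      simp
    · simp only [List.foldl_cons, pvSplitStep, pvSplitRec, if_neg h]
      split_ifs <;> simp_all

theorem pvPartition_none {sep : Char} {key : List Char} (h : sep ∉ key) :
    pvPartitionChar sep key = (key, false, []) := by
  induction key with
  | nil => rfl
  | cons c cs ih =>
    simp only [List.mem_cons, not_or] at h
    simp [pvPartitionChar, Ne.symm h.1, ih h.2]

theorem pvPartition_some {sep : Char} {key : List Char} (v : List Char) (h : sep ∉ key) :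
    pvPartitionChar sep (key ++ sep :: v) = (key, true, v) := by
  induction key with
  | nil => simp [pvPartitionChar]
  | cons c cs ih =>
    simp only [List.mem_cons, not_or] at h
    simp [pvPartitionChar, Ne.symm h.1, ih h.2]

theorem pvFlush_eq (key : List Char) (val? : Option (List Char)) (h : '=' ∉ key) :
    pvFlushB key val? = pvSanProp (pvRep key val?) := by
  cases val? with
  | none => simp [pvFlushB, pvRep, pvSanProp, pvPartition_none h]
  | some v =>
    simp only [pvFlushB, pvRep, pvSanProp, pvPartition_some v h]
    split_ifs <;> simp_all

-- main loop correspondence: B's fused pass equals A's split-then-map-then-join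
theorem pvMain (cs : List Char) : ∀ (out key : List Char) (val? : Option (List Char)) (d : Nat),
    '=' ∉ key →
    (cs.foldl pvStepB (out, key, val?, d)).1 ++
        pvFlushB (cs.foldl pvStepB (out, key, val?, d)).2.1
          (cs.foldl pvStepB (out, key, val?, d)).2.2.1
      = out ++ PySem.Chars.join [';'] ((pvSplitRec cs (pvRep key val?) d).map pvSanProp) := by
  induction cs with
  | nil =>
    intro out key val? d h
    simp [pvSplitRec, PySem.Chars.join_singleton, pvFlush_eq key val? h]
  | cons c cs ih =>
    intro out key val? d h
    by_cases hb : c = ';' ∧ d = 0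
    · simp only [List.foldl_cons, pvStepB, pvSplitRec, if_pos hb]
      rw [ih (out ++ pvFlushB key val? ++ [';']) [] none d (by simp)]
      rw [List.map_cons,
        pvJoin_cons _ _ _ (by
          simp only [ne_eq, List.map_eq_nil_iff]
          exact pvSplitRec_ne_nil cs [] d),
        pvFlush_eq key val? h]
      simp [pvRep]
    · simp only [List.foldl_cons, pvStepB, pvSplitRec, if_neg hb]
      -- the (key, val?) update preserves the reconstruction invariant
      generalize hM : (match val? with
        | none => if c = '=' then (key, some []) else (key ++ [c], none)
        | some v => (key, some (v ++ [c]))) = kv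
      obtain ⟨key', val'⟩ := kv
      have hkv : '=' ∉ key' ∧ pvRep key' val' = pvRep key val? ++ [c] := by
        cases val? with
        | none =>
          by_cases hcq : c = '='
          · have hM' : (key, some ([] : List Char)) = (key', val') := by
              rw [← hM]; simp [hcq]
            obtain ⟨rfl, rfl⟩ := Prod.mk.injEq .. |>.mp hM'
            exact ⟨h, by simp [pvRep, hcq]⟩
          · have hM' : (key ++ [c], (none : Option (List Char))) = (key', val') := by
              rw [← hM]; simp [hcq]
            obtain ⟨rfl, rfl⟩ := Prod.mk.injEq .. |>.mp hM'
            exact ⟨by simp [h, Ne.symm hcq], by simp [pvRep]⟩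
        | some v =>
          have hM' : (key, some (v ++ [c])) = (key', val') := hM
          obtain ⟨rfl, rfl⟩ := Prod.mk.injEq .. |>.mp hM'
          exact ⟨h, by simp [pvRep]⟩
      have hst : (if c = '{' then (out, (key', val').1, (key', val').2, d + 1)
          else if c = '}' ∧ d ≠ 0 then (out, (key', val').1, (key', val').2, d - 1)
          else (out, (key', val').1, (key', val').2, d))
          = (out, key', val', if c = '{' then d + 1 else if c = '}' ∧ d > 0 then d - 1 else d) := by
        split_ifs <;> simp_all
      rw [hst, ih _ _ _ _ hkv.1, hkv.2]

theorem pvPartition_takeWhile (sep : Char) (cs : List Char) :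
    pvPartitionChar sep cs =
      (cs.takeWhile (· ≠ sep), cs.contains sep, (cs.dropWhile (· ≠ sep)).tail) := by
  induction cs with
  | nil => simp [pvPartitionChar]
  | cons c cs ih =>
    by_cases hc : c = sep
    · subst hc; simp [pvPartitionChar, List.takeWhile, List.dropWhile]
    · simp [pvPartitionChar, hc, ih, List.takeWhile, List.dropWhile, Ne.symm hc]

theorem pvAfterLast_of_not_mem {sep : Char} {cs : List Char} (h : sep ∉ cs) :
    pvAfterLast sep cs = cs := by
  unfold pvAfterLast
  rw [List.takeWhile_eq_self_iff.mpr (by intro x hx; simp; rintro rfl; simp at hx; exact h hx)]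
  simp

theorem pvStrip_eq_afterLast (cs : List Char) : pvStripUserinfo cs = pvAfterLast '@' cs := by
  unfold pvStripUserinfo
  by_cases h : '@' ∈ cs
  · simp [h]
  · simp [h, pvAfterLast_of_not_mem h]

-- ===== VERDICT (by name: the statement is the Claim_ definition above) =====
theorem sanitize_sqlserver_url_py_spec : Claim_equal_sanitize_sqlserver_url_py := by
  intro value _
  unfold Spec_sanitize_sqlserver_url_py
  simp only [sanitize_sqlserver_url_py, sanitize_sqlserver_url_py_alt,
    pvPartition_takeWhile, pvStrip_eq_afterLast]
  by_cases h : (value.toList.drop pvPrefix.length).contains ';' = false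
  · have hmem : ';' ∉ value.toList.drop pvPrefix.length := by simpa using h
    rw [List.takeWhile_eq_self_iff.mpr (by intro x hx; simp; rintro rfl; exact hmem hx)]
    simp [hmem]
  · have hc : (value.toList.drop pvPrefix.length).contains ';' = true := by simpa using h
    simp only [hc, Bool.true_eq_false, if_false]
    have hmain := pvMain ((value.toList.drop pvPrefix.length).dropWhile (· ≠ ';')).tail
      (pvPrefix ++ pvAfterLast '@' ((value.toList.drop pvPrefix.length).takeWhile (· ≠ ';')) ++ [';'])
      [] none 0 (by simp)
    simp only [pvRep] at hmain
    rw [hmain]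
    have hsplit := pvFoldl_split ((value.toList.drop pvPrefix.length).dropWhile (· ≠ ';')).tail [] [] 0
    simp only [List.nil_append] at hsplit
    rw [pvSplitProps, ← hsplit]
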